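-- pv_equiv track=rewrite | github.com/Bhumika2006-hue/GFG-Code-by-Bhumi | Difficulty: Hard/Largest Sum Cycle/largest-sum-cycle.py | largestSumCycle
-- ===== SOURCE A (Python) =====
-- def largestSumCycle(N, Edge):
--     vis = [False] * N
--     path_vis = [False] * N
--     max_cycle_sum = -1
--
--     # We use this to track the sequence of nodes in the current path
--     # to easily calculate the sum once a cycle is found.
--     path_stack = []
--
--     for i in range(N):
--         if not vis[i]:
--             curr = i
--             local_path = []
--             while curr != -1 and not vis[curr]:
--                 vis[curr] = True
--                 path_vis[curr] = True
--                 local_path.append(curr)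
--                 curr = Edge[curr]
--
--             # If we hit a node that is in path_vis, we found a cycle
--             if curr != -1 and path_vis[curr]:
--                 curr_sum = 0
--                 # Traverse backwards through local_path to find where the cycle starts
--                 for j in range(len(local_path) - 1, -1, -1):
--                     curr_sum += local_path[j]
--                     if local_path[j] == curr:
--                         break
--                 max_cycle_sum = max(max_cycle_sum, curr_sum)
--
--             # Clean up path_vis for the next component
--             for node in local_path:
--                 path_vis[node] = False
--
--     return max_cycle_sum
-- ===== SOURCE B (Python) =====
-- def largestSumCycle(N, Edge):
--     # Timestamped single-sweep version: order[v] = 0 if unvisited, else its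
--     # global 1-based visit time; csum[v] = prefix sum of node values along the
--     # walk up to and including v.  No per-component cleanup pass is needed:
--     # a hit with stamp >= seg_start is on the current path, an older stamp is
--     # an earlier component.
--     order = [0] * N
--     csum = [0] * N
--     stamp = 0
--     best = -1
--     for i in range(N):
--         if order[i] == 0:
--             seg_start = stamp + 1
--             total = 0
--             curr = i
--             prev = -1
--             while curr != -1 and order[curr] == 0:
--                 stamp += 1
--                 order[curr] = stamp
--                 total += curr
--                 csum[curr] = total
--                 prev = curr
--                 curr = Edge[curr]
--             if curr != -1 and order[curr] >= seg_start:
--                 best = max(best, csum[prev] - csum[curr] + curr)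
--     return best
-- ===== Notes on version B (the rewrite author's own statement) =====
-- stated objective: alternative
-- what changed: Replaces A's boolean path_vis marking, backward re-scan of the local path to locate the cycle entry, and per-component cleanup loop with global visit timestamps and running prefix sums, so the cycle sum is one O(1) subtraction csum[prev]-csum[curr]+curr and no cleanup or backward scan exists.
-- outside the precondition, e.g. on largestSumCycle(2, [-2, 0]): A returns 0, B returns -1; on largestSumCycle(1, [5]): A raises IndexError, B raises IndexError
import Mathlib
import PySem

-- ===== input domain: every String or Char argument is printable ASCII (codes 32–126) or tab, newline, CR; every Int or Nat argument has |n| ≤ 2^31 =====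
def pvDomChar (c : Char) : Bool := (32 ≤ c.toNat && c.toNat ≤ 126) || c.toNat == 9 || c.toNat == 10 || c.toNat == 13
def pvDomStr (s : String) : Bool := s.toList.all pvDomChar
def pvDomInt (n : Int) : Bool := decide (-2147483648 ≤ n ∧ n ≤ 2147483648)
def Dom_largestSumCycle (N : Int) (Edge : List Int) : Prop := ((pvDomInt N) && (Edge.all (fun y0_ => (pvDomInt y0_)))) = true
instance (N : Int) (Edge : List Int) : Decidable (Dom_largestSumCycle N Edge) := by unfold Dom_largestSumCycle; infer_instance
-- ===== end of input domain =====

-- B replaces A's path_vis marking + backward cycle re-scan + per-component cleanup by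
-- global visit timestamps and running prefix sums (alternative decomposition, same O(N) cost).

-- ===== PORT A =====
-- inner while loop of A: state (vis, path_vis, local_path, curr); fuel only makes it total
def aWhile (Edge : List Int) : Nat → List Bool → List Bool → List Int → Int →
    List Bool × List Bool × List Int × Int
  | 0, vis, pv, path, curr => (vis, pv, path, curr)
  | fuel+1, vis, pv, path, curr =>
    if curr ≠ -1 ∧ PySem.List.pyGetD vis curr true = false then
      aWhile Edge fuel (PySem.List.pySetD vis curr true) (PySem.List.pySetD pv curr true)
        (path ++ [curr]) (PySem.List.pyGetD Edge curr (-1))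
    else (vis, pv, path, curr)

-- A's backward scan `for j in range(len(local_path)-1, -1, -1)` with break, as a
-- recursion over the reversed path (the same element sequence)
def aScan (target : Int) : List Int → Int → Int
  | [], s => s
  | x :: xs, s => if x = target then s + x else aScan target xs (s + x)

-- one body of A's outer `for i in range(N)` loop; state (vis, path_vis, max_cycle_sum)
def aBody (Edge : List Int) (fuel : Nat) (st : List Bool × List Bool × Int) (i : Int) :
    List Bool × List Bool × Int :=
  if PySem.List.pyGetD st.1 i true = false then
    let r := aWhile Edge fuel st.1 st.2.1 [] i
    let mx := if r.2.2.2 ≠ -1 ∧ PySem.List.pyGetD r.2.1 r.2.2.2 false = true then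
        max st.2.2 (aScan r.2.2.2 r.2.2.1.reverse 0)
      else st.2.2
    (r.1, r.2.2.1.foldl (fun pvv node => PySem.List.pySetD pvv node false) r.2.1, mx)
  else st

def largestSumCycle (N : Int) (Edge : List Int) : Int :=
  ((PySem.List.pyRange 0 N 1).foldl (aBody Edge (N.toNat + 1))
    (List.replicate N.toNat false, List.replicate N.toNat false, (-1 : Int))).2.2

-- ===== PORT B =====
-- inner while loop of B: state (order, csum, stamp, total, prev, curr)
def bWhile (Edge : List Int) : Nat → List Int → List Int → Int → Int → Int → Int →
    List Int × List Int × Int × Int × Int × Int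
  | 0, order, csum, stamp, total, prev, curr => (order, csum, stamp, total, prev, curr)
  | fuel+1, order, csum, stamp, total, prev, curr =>
    if curr ≠ -1 ∧ PySem.List.pyGetD order curr 1 = 0 then
      bWhile Edge fuel (PySem.List.pySetD order curr (stamp + 1))
        (PySem.List.pySetD csum curr (total + curr)) (stamp + 1) (total + curr) curr
        (PySem.List.pyGetD Edge curr (-1))
    else (order, csum, stamp, total, prev, curr)

-- one body of B's outer loop; state (order, csum, stamp, best)
def bBody (Edge : List Int) (fuel : Nat) (st : List Int × List Int × Int × Int) (i : Int) :
    List Int × List Int × Int × Int :=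
  if PySem.List.pyGetD st.1 i 1 = 0 then
    let r := bWhile Edge fuel st.1 st.2.1 st.2.2.1 0 (-1) i
    let best := if r.2.2.2.2.2 ≠ -1 ∧ st.2.2.1 + 1 ≤ PySem.List.pyGetD r.1 r.2.2.2.2.2 0 then
        max st.2.2.2 (PySem.List.pyGetD r.2.1 r.2.2.2.2.1 0 -
          PySem.List.pyGetD r.2.1 r.2.2.2.2.2 0 + r.2.2.2.2.2)
      else st.2.2.2
    (r.1, r.2.1, r.2.2.1, best)
  else st

def largestSumCycle_alt (N : Int) (Edge : List Int) : Int :=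
  ((PySem.List.pyRange 0 N 1).foldl (bBody Edge (N.toNat + 1))
    (List.replicate N.toNat 0, List.replicate N.toNat 0, (0 : Int), (-1 : Int))).2.2.2

-- ===== PRECONDITION & SPEC =====
-- Pre_ restricts to the task's natural domain (N ≤ len(Edge) and the N used edges in [-1, N));
-- outside it A raises IndexError or reads/writes through Python's negative-index wraparound,
-- which B does not reproduce.
def Pre_largestSumCycle (N : Int) (Edge : List Int) : Prop :=
  N ≤ (Edge.length : Int) ∧ ∀ e ∈ Edge.take N.toNat, -1 ≤ e ∧ e < N
instance (N : Int) (Edge : List Int) : Decidable (Pre_largestSumCycle N Edge) := by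
  unfold Pre_largestSumCycle; infer_instance

def pvWitness_largestSumCycle : Int × List Int := (4, [1, 2, 3, 1])

def Spec_largestSumCycle (N : Int) (Edge : List Int) (out : Int) : Prop := out = largestSumCycle_alt N Edge
instance (N : Int) (Edge : List Int) (out : Int) : Decidable (Spec_largestSumCycle N Edge out) := by unfold Spec_largestSumCycle; infer_instance

-- ===== CLAIM (what is proved, stated in full; the proofs are below) =====
def Claim_equal_largestSumCycle : Prop := ∀ (N : Int) (Edge : List Int), Dom_largestSumCycle N Edge → Pre_largestSumCycle N Edge → Spec_largestSumCycle N Edge (largestSumCycle N Edge)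

-- ===== LEMMAS AND PROOFS =====

-- the default of List.getD is irrelevant in range
lemma getD_irrel {α : Type} (xs : List α) (k : Nat) (d1 d2 : α) (h : k < xs.length) :
    xs.getD k d1 = xs.getD k d2 := by
  rw [List.getD_eq_getElem _ _ h, List.getD_eq_getElem _ _ h]

-- simulation invariant between A's and B's inner loop states
structure WInv (NN : Nat) (stamp0 : Int) (vis pv : List Bool) (path : List Int) (curr : Int)
    (order csum : List Int) (stamp total prev : Int) : Prop where
  lv : vis.length = NN
  lp : pv.length = NN
  lo : order.length = NN
  lc : csum.length = NN
  h0 : 0 ≤ stamp0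
  hvo : ∀ k : Nat, k < NN → (vis.getD k false = false ↔ order.getD k 0 = 0)
  hpv : ∀ k : Nat, k < NN → (pv.getD k false = true ↔ (k : Int) ∈ path)
  hmem : ∀ p ∈ path, 0 ≤ p ∧ p < (NN : Int)
  hstamp : stamp = stamp0 + path.length
  htot : total = path.sum
  hop : ∀ j : Nat, (hj : j < path.length) → order.getD (path[j]).toNat 0 = stamp0 + 1 + j
  hoff : ∀ k : Nat, k < NN → (k : Int) ∉ path → order.getD k 0 ≤ stamp0
  hcs : ∀ j : Nat, (hj : j < path.length) → csum.getD (path[j]).toNat 0 = (path.take (j+1)).sum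
  hprev : prev = path.reverse.headD (-1)
  hcurr : curr = -1 ∨ (0 ≤ curr ∧ curr < (NN : Int))

-- distinct stamps make the path duplicate-free
lemma path_inj {NN stamp0 vis pv path curr order csum stamp total prev}
    (W : WInv NN stamp0 vis pv path curr order csum stamp total prev)
    {j1 j2 : Nat} (h1 : j1 < path.length) (h2 : j2 < path.length)
    (he : path[j1] = path[j2]) : j1 = j2 := by
  have e1 := W.hop j1 h1
  have e2 := W.hop j2 h2
  rw [he] at e1
  rw [e1] at e2
  omega

-- inner-loop simulation: with equal fuel, A's and B's walks stay in lockstep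
lemma whileSim (Edge : List Int) (NN : Nat)
    (hE : ∀ k : Nat, k < NN → -1 ≤ Edge.getD k (-1) ∧ Edge.getD k (-1) < (NN : Int)) (stamp0 : Int) :
    ∀ (fuel : Nat) (vis pv : List Bool) (path : List Int) (curr : Int)
      (order csum : List Int) (stamp total prev : Int),
    WInv NN stamp0 vis pv path curr order csum stamp total prev →
    ∃ vis' pv' path' curr' order' csum' stamp' total' prev',
      aWhile Edge fuel vis pv path curr = (vis', pv', path', curr') ∧
      bWhile Edge fuel order csum stamp total prev curr = (order', csum', stamp', total', prev', curr') ∧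
      WInv NN stamp0 vis' pv' path' curr' order' csum' stamp' total' prev' ∧
      path <+: path' ∧
      ((curr ≠ -1 ∧ vis.getD curr.toNat false = false) → fuel ≠ 0 → path.length < path'.length) := by
  intro fuel
  induction fuel with
  | zero =>
    intro vis pv path curr order csum stamp total prev W
    exact ⟨vis, pv, path, curr, order, csum, stamp, total, prev, rfl, rfl, W,
      List.prefix_refl _, fun _ h => absurd rfl h⟩
  | succ fuel ih =>
    intro vis pv path curr order csum stamp total prev W
    by_cases hc : curr = -1 ∨ ¬ vis.getD curr.toNat false = false
    · -- loop condition is false on both sides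
      have hA : ¬ (curr ≠ -1 ∧ PySem.List.pyGetD vis curr true = false) := by
        rcases hc with h | h
        · exact fun hh => hh.1 h
        · intro hh
          rcases W.hcurr with h' | h'
          · exact hh.1 h'
          · have hk : curr.toNat < NN := by omega
            rw [PySem.List.pyGetD_of_nonneg _ _ h'.1,
              getD_irrel _ _ _ false (by rw [W.lv]; omega)] at hh
            exact h hh.2
      have hB : ¬ (curr ≠ -1 ∧ PySem.List.pyGetD order curr 1 = 0) := by
        rcases hc with h | h
        · exact fun hh => hh.1 h
        · intro hh
          rcases W.hcurr with h' | h'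
          · exact hh.1 h'
          · have hk : curr.toNat < NN := by omega
            rw [PySem.List.pyGetD_of_nonneg _ _ h'.1,
              getD_irrel _ _ _ 0 (by rw [W.lo]; omega)] at hh
            exact h ((W.hvo curr.toNat hk).mpr hh.2)
      refine ⟨vis, pv, path, curr, order, csum, stamp, total, prev, ?_, ?_, W,
        List.prefix_refl _, ?_⟩
      · simp only [aWhile, if_neg hA]
      · simp only [bWhile, if_neg hB]
      · intro hh _
        rcases hc with h | h
        · exact absurd h hh.1
        · exact absurd hh.2 h
    · -- loop condition true on both sides
      push Not at hc
      obtain ⟨hne, hvF⟩ := hc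
      rcases W.hcurr with h' | h'
      · exact absurd h' hne
      obtain ⟨hge, hlt⟩ := h'
      set c : Nat := curr.toNat with hcdef
      have hcN : c < NN := by omega
      have hcast : (c : Int) = curr := by omega
      have hA : curr ≠ -1 ∧ PySem.List.pyGetD vis curr true = false := by
        refine ⟨hne, ?_⟩
        rw [PySem.List.pyGetD_of_nonneg _ _ hge,
          getD_irrel _ _ _ false (by rw [W.lv]; omega)]
        exact hvF
      have hB : curr ≠ -1 ∧ PySem.List.pyGetD order curr 1 = 0 := by
        refine ⟨hne, ?_⟩
        rw [PySem.List.pyGetD_of_nonneg _ _ hge,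
          getD_irrel _ _ _ 0 (by rw [W.lo]; omega)]
        exact (W.hvo c hcN).mp hvF
      -- curr is not yet on the path
      have hnotin : (curr : Int) ∉ path := by
        intro hmem
        obtain ⟨j, hj, hje⟩ := List.mem_iff_getElem.mp hmem
        have := W.hop j hj
        rw [hje] at this
        have h0 := W.h0
        have hvT : order.getD curr.toNat 0 ≠ 0 := by rw [this]; omega
        exact hvT ((W.hvo c hcN).mp hvF)
      -- the new edge target is in range
      have hnext : PySem.List.pyGetD Edge curr (-1) = -1 ∨
          (0 ≤ PySem.List.pyGetD Edge curr (-1) ∧ PySem.List.pyGetD Edge curr (-1) < (NN : Int)) := by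
        rw [PySem.List.pyGetD_of_nonneg _ _ hge]
        have hx := hE c hcN
        simp only [hcdef] at hx
        omega
      -- the updated states satisfy the invariant again
      have W' : WInv NN stamp0 (PySem.List.pySetD vis curr true) (PySem.List.pySetD pv curr true)
          (path ++ [curr]) (PySem.List.pyGetD Edge curr (-1))
          (PySem.List.pySetD order curr (stamp + 1)) (PySem.List.pySetD csum curr (total + curr))
          (stamp + 1) (total + curr) curr := by
        have hsetv : PySem.List.pySetD vis curr true = vis.set c true :=
          PySem.List.pySetD_of_nonneg _ _ hge
        have hsetp : PySem.List.pySetD pv curr true = pv.set c true :=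
          PySem.List.pySetD_of_nonneg _ _ hge
        have hseto : PySem.List.pySetD order curr (stamp + 1) = order.set c (stamp + 1) :=
          PySem.List.pySetD_of_nonneg _ _ hge
        have hsetc : PySem.List.pySetD csum curr (total + curr) = csum.set c (total + curr) :=
          PySem.List.pySetD_of_nonneg _ _ hge
        have hgetset : ∀ {α : Type} (xs : List α) (v d : α) (k : Nat), xs.length = NN →
            (xs.set c v).getD k d = if k = c then v else xs.getD k d := by
          intro α xs v d k hlen
          rw [List.getD_eq_getElem?_getD, List.getElem?_set, List.getD_eq_getElem?_getD]
          by_cases hk : c = k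
          · subst hk; simp [hlen, hcN]
          · simp [hk, Ne.symm hk]
        refine ⟨?_, ?_, ?_, ?_, W.h0, ?_, ?_, ?_, ?_, ?_, ?_, ?_, ?_, ?_, ?_⟩
        · rw [hsetv, List.length_set]; exact W.lv
        · rw [hsetp, List.length_set]; exact W.lp
        · rw [hseto, List.length_set]; exact W.lo
        · rw [hsetc, List.length_set]; exact W.lc
        · -- hvo
          intro k hk
          rw [hsetv, hseto, hgetset vis true false k W.lv, hgetset order (stamp+1) 0 k W.lo]
          by_cases hkc : k = c
          · subst hkc
            have h0 := W.h0
            have hst := W.hstamp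
            rw [if_pos rfl, if_pos rfl]
            constructor
            · intro h; simp at h
            · intro h; exfalso; omega
          · simp only [if_neg hkc]; exact W.hvo k hk
        · -- hpv
          intro k hk
          rw [hsetp, hgetset pv true false k W.lp]
          by_cases hkc : k = c
          · subst hkc; simp [hcast]
          · simp only [if_neg hkc, List.mem_append, List.mem_singleton]
            rw [W.hpv k hk]
            constructor
            · exact fun h => Or.inl h
            · rintro (h | h)
              · exact h
              · exfalso; apply hkc; omega
        · -- hmem
          intro p hp
          rcases List.mem_append.mp hp with h | h
          · exact W.hmem p h
          · rw [List.mem_singleton] at h; subst h; exact ⟨hge, hlt⟩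
        · -- hstamp
          rw [W.hstamp]; simp; omega
        · -- htot
          rw [W.htot]; simp
        · -- hop
          intro j hj
          rw [hseto]
          rw [List.length_append, List.length_singleton] at hj
          by_cases hjl : j < path.length
          · rw [List.getElem_append_left hjl]
            rw [hgetset order (stamp+1) 0 _ W.lo]
            have hne' : (path[j]).toNat ≠ c := by
              intro he
              apply hnotin
              have hpj := W.hmem path[j] (List.getElem_mem hjl)
              have : path[j] = curr := by omega
              rw [← this]; exact List.getElem_mem hjl
            rw [if_neg hne']
            exact W.hop j hjl
          · have hje : j = path.length := by omega
            subst hje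
            rw [List.getElem_append_right (le_refl _)]
            simp only [Nat.sub_self, List.getElem_singleton]
            rw [hgetset order (stamp+1) 0 _ W.lo, if_pos rfl, W.hstamp]
            ring
        · -- hoff
          intro k hk hknot
          rw [hseto, hgetset order (stamp+1) 0 k W.lo]
          have hkc : k ≠ c := by
            intro he; apply hknot; subst he
            simp [hcast]
          rw [if_neg hkc]
          exact W.hoff k hk (fun h => hknot (List.mem_append.mpr (Or.inl h)))
        · -- hcs
          intro j hj
          rw [hsetc]
          rw [List.length_append, List.length_singleton] at hj
          by_cases hjl : j < path.length
          · rw [List.getElem_append_left hjl, hgetset csum (total + curr) 0 _ W.lc]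
            have hne' : (path[j]).toNat ≠ c := by
              intro he
              apply hnotin
              have hpj := W.hmem path[j] (List.getElem_mem hjl)
              have : path[j] = curr := by omega
              rw [← this]; exact List.getElem_mem hjl
            rw [if_neg hne', List.take_append_of_le_length (by omega)]
            exact W.hcs j hjl
          · have hje : j = path.length := by omega
            subst hje
            rw [List.getElem_append_right (le_refl _)]
            simp only [Nat.sub_self, List.getElem_singleton]
            rw [hgetset csum (total + curr) 0 _ W.lc, if_pos rfl, W.htot]
            rw [List.take_of_length_le (by simp)]
            simp
        · -- hprev
          simp
        · -- hcurr
          exact hnext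
      obtain ⟨vis', pv', path', curr', order', csum', stamp', total', prev', ha, hb, Wf, hpre, _⟩ :=
        ih _ _ _ _ _ _ _ _ _ W'
      refine ⟨vis', pv', path', curr', order', csum', stamp', total', prev', ?_, ?_, Wf, ?_, ?_⟩
      · simp only [aWhile, if_pos hA]; exact ha
      · simp only [bWhile, if_pos hB]; exact hb
      · exact ((path.prefix_append [curr]).trans hpre)
      · intro _ _
        have := hpre.length_le
        simp at this
        omega
-- A's backward scan over l1 ++ t :: l2 with t ∉ l1 sums l1 and stops at t
lemma aScan_append (t : Int) : ∀ (l1 l2 : List Int) (s : Int), t ∉ l1 →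
    aScan t (l1 ++ t :: l2) s = s + l1.sum + t := by
  intro l1
  induction l1 with
  | nil => intro l2 s _; simp [aScan]
  | cons x xs ih =>
    intro l2 s hnot
    simp only [List.mem_cons, not_or] at hnot
    simp only [List.cons_append, aScan, if_neg (Ne.symm hnot.1)]
    rw [ih l2 (s + x) hnot.2]
    simp
    ring

-- after the walk, A's cycle test (path_vis hit) agrees with B's (fresh timestamp hit),
-- and when a cycle is found the back-scanned sum equals the prefix-sum difference
lemma postEq {NN stamp0 vis pv path curr order csum stamp total prev}
    (W : WInv NN stamp0 vis pv path curr order csum stamp total prev) (hne : path ≠ []) :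
    ((curr ≠ -1 ∧ PySem.List.pyGetD pv curr false = true) ↔
      (curr ≠ -1 ∧ stamp0 + 1 ≤ PySem.List.pyGetD order curr 0)) ∧
    ((curr ≠ -1 ∧ PySem.List.pyGetD pv curr false = true) →
      aScan curr path.reverse 0 =
        PySem.List.pyGetD csum prev 0 - PySem.List.pyGetD csum curr 0 + curr) := by
  have h0 := W.h0
  constructor
  · constructor
    · rintro ⟨h1, h2⟩
      refine ⟨h1, ?_⟩
      rcases W.hcurr with h | h
      · exact absurd h h1
      have hk : curr.toNat < NN := by omega
      rw [PySem.List.pyGetD_of_nonneg _ _ h.1] at h2 ⊢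
      rw [getD_irrel _ _ _ false (by rw [W.lp]; omega)] at h2
      have hmem : (curr.toNat : Int) ∈ path := (W.hpv curr.toNat hk).mp h2
      obtain ⟨j, hj, hje⟩ := List.mem_iff_getElem.mp hmem
      have := W.hop j hj
      rw [hje] at this
      have : order.getD ((curr.toNat : Int)).toNat 0 = stamp0 + 1 + j := this
      simp only [Int.toNat_natCast] at this
      rw [this]
      omega
    · rintro ⟨h1, h2⟩
      refine ⟨h1, ?_⟩
      rcases W.hcurr with h | h
      · exact absurd h h1
      have hk : curr.toNat < NN := by omega
      rw [PySem.List.pyGetD_of_nonneg _ _ h.1] at h2 ⊢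
      rw [getD_irrel _ _ _ false (by rw [W.lp]; omega)]
      rw [W.hpv curr.toNat hk]
      by_contra hnot
      have := W.hoff curr.toNat hk hnot
      omega
  · rintro ⟨h1, h2⟩
    rcases W.hcurr with h | h
    · exact absurd h h1
    have hk : curr.toNat < NN := by omega
    rw [PySem.List.pyGetD_of_nonneg _ _ h.1] at h2
    rw [getD_irrel _ _ _ false (by rw [W.lp]; omega)] at h2
    have hmem : (curr.toNat : Int) ∈ path := (W.hpv curr.toNat hk).mp h2
    rw [show ((curr.toNat : Int)) = curr by omega] at hmem
    obtain ⟨j, hj, hje⟩ := List.mem_iff_getElem.mp hmem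
    -- prev is the last node of the path
    have hprev : prev = path.getLast hne := by
      rw [W.hprev, List.headD_eq_head?_getD, List.head?_reverse,
        List.getLast?_eq_some_getLast hne]
      rfl
    have hprevmem : prev ∈ path := by rw [hprev]; exact List.getLast_mem hne
    have hprev0 : 0 ≤ prev := (W.hmem prev hprevmem).1
    have hlast : path.getLast hne = path[path.length - 1] := List.getLast_eq_getElem hne
    have hlen : 0 < path.length := List.length_pos_iff.mpr hne
    -- csum at prev is the whole path sum
    have hcprev : PySem.List.pyGetD csum prev 0 = path.sum := by
      rw [PySem.List.pyGetD_of_nonneg _ _ hprev0]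
      have := W.hcs (path.length - 1) (by omega)
      rw [Nat.sub_add_cancel hlen, List.take_length] at this
      rw [hprev, hlast]
      exact this
    -- csum at curr is the prefix sum up to and including curr
    have hccurr : PySem.List.pyGetD csum curr 0 = (path.take (j+1)).sum := by
      rw [PySem.List.pyGetD_of_nonneg _ _ h.1]
      have := W.hcs j hj
      rw [hje] at this
      exact this
    -- curr occurs nowhere after position j
    have hnotin : curr ∉ path.drop (j+1) := by
      intro hmem'
      obtain ⟨m, hm, hme⟩ := List.mem_iff_getElem.mp hmem'
      have hd : (path.drop (j+1)).length = path.length - (j+1) := by simp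
      rw [List.getElem_drop] at hme
      have := path_inj W hj (by omega : j + 1 + m < path.length) (by rw [hje, hme])
      omega
    -- decompose the reversed path around curr
    have hsplit : path.reverse = (path.drop (j+1)).reverse ++ curr :: (path.take j).reverse := by
      conv_lhs => rw [← List.take_append_drop j path]
      rw [← List.getElem_cons_drop hj, hje, List.reverse_append, List.reverse_cons]
      simp
    rw [hsplit, aScan_append curr _ _ _ (by simpa using hnotin)]
    rw [List.sum_reverse, hcprev, hccurr]
    have hsum := List.sum_take_add_sum_drop path (j+1)
    have : path.take (j+1) = path.take j ++ [curr] := by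
      rw [← hje]
      exact List.take_succ_eq_append_getElem hj
    rw [this] at hsum ⊢
    simp at hsum ⊢
    linarith [hsum]
-- A's per-component cleanup loop: setting every path node back to false
lemma cleanupEq (NN : Nat) : ∀ (path : List Int) (pv : List Bool), pv.length = NN →
    (∀ p ∈ path, 0 ≤ p ∧ p < (NN : Int)) →
    (path.foldl (fun a node => PySem.List.pySetD a node false) pv).length = NN ∧
    (∀ k : Nat, k < NN →
      (path.foldl (fun a node => PySem.List.pySetD a node false) pv).getD k false =
        if (k : Int) ∈ path then false else pv.getD k false) := by
  intro path
  induction path with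
  | nil => intro pv hl _; exact ⟨hl, fun k _ => by simp⟩
  | cons x xs ih =>
    intro pv hl hmem
    have hx := hmem x List.mem_cons_self
    have hset : PySem.List.pySetD pv x false = pv.set x.toNat false :=
      PySem.List.pySetD_of_nonneg _ _ hx.1
    have hl' : (PySem.List.pySetD pv x false).length = NN := by
      rw [hset, List.length_set]; exact hl
    obtain ⟨ih1, ih2⟩ := ih (PySem.List.pySetD pv x false) hl'
      (fun p hp => hmem p (List.mem_cons_of_mem _ hp))
    refine ⟨ih1, fun k hk => ?_⟩
    simp only [List.foldl_cons] at *
    rw [ih2 k hk, hset]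
    rw [List.getD_eq_getElem?_getD, List.getElem?_set, List.getD_eq_getElem?_getD]
    by_cases hmx : (k : Int) ∈ xs
    · simp [hmx]
    · by_cases hkx : x.toNat = k
      · have : (k : Int) = x := by omega
        simp [this, hl, hkx, hk]
      · have : ¬ (k : Int) = x := by omega
        simp [hmx, this, hkx]

-- simulation invariant between A's and B's outer loop states
structure OInv (NN : Nat) (vis pv : List Bool) (mx : Int)
    (order csum : List Int) (stamp best : Int) : Prop where
  lv : vis.length = NN
  lp : pv.length = NN
  lo : order.length = NN
  lc : csum.length = NN
  h0 : 0 ≤ stamp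
  hvo : ∀ k : Nat, k < NN → (vis.getD k false = false ↔ order.getD k 0 = 0)
  hpvF : ∀ k : Nat, k < NN → pv.getD k false = false
  hoff : ∀ k : Nat, k < NN → order.getD k 0 ≤ stamp
  hmx : mx = best

-- one outer iteration preserves the simulation
lemma bodySim (Edge : List Int) (NN : Nat)
    (hE : ∀ k : Nat, k < NN → -1 ≤ Edge.getD k (-1) ∧ Edge.getD k (-1) < (NN : Int))
    (fuel : Nat) (hf : fuel ≠ 0)
    (i : Int) (hi : 0 ≤ i ∧ i < (NN : Int))
    (vis pv : List Bool) (mx : Int) (order csum : List Int) (stamp best : Int)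
    (O : OInv NN vis pv mx order csum stamp best) :
    OInv NN (aBody Edge fuel (vis, pv, mx) i).1 (aBody Edge fuel (vis, pv, mx) i).2.1
      (aBody Edge fuel (vis, pv, mx) i).2.2 (bBody Edge fuel (order, csum, stamp, best) i).1
      (bBody Edge fuel (order, csum, stamp, best) i).2.1
      (bBody Edge fuel (order, csum, stamp, best) i).2.2.1
      (bBody Edge fuel (order, csum, stamp, best) i).2.2.2 := by
  have hiN : i.toNat < NN := by omega
  by_cases hA : PySem.List.pyGetD vis i true = false
  · -- node i unvisited: both enter the walk
    have hA' : vis.getD i.toNat false = false := by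
      rw [PySem.List.pyGetD_of_nonneg _ _ hi.1,
        getD_irrel _ _ _ false (by rw [O.lv]; omega)] at hA
      exact hA
    have hB : PySem.List.pyGetD order i 1 = 0 := by
      rw [PySem.List.pyGetD_of_nonneg _ _ hi.1,
        getD_irrel _ _ _ 0 (by rw [O.lo]; omega)]
      exact (O.hvo i.toNat hiN).mp hA'
    -- the walk invariant holds at entry
    have W0 : WInv NN stamp vis pv [] i order csum stamp 0 (-1) := by
      refine ⟨O.lv, O.lp, O.lo, O.lc, O.h0, O.hvo, ?_, ?_, by simp, by simp, ?_, ?_, ?_,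
        by simp, Or.inr hi⟩
      · intro k hk; rw [O.hpvF k hk]; simp
      · intro p hp; cases hp
      · intro j hj; cases hj
      · intro k hk _; exact O.hoff k hk
      · intro j hj; cases hj
    obtain ⟨vis', pv', path', curr', order', csum', stamp', total', prev', ha, hb, Wf, _, hgrow⟩ :=
      whileSim Edge NN hE stamp fuel vis pv [] i order csum stamp 0 (-1) W0
    have hne : path' ≠ [] := by
      have := hgrow ⟨by omega, hA'⟩ hf
      intro h; rw [h] at this; simp at this
    obtain ⟨hiff, hsum⟩ := postEq Wf hne
    have hstamp' : stamp' = stamp + path'.length := Wf.hstamp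
    have h00 := O.h0
    obtain ⟨hcl, hcg⟩ := cleanupEq NN path' pv' Wf.lp Wf.hmem
    simp only [aBody, bBody, if_pos hA, if_pos hB, ha, hb]
    refine ⟨Wf.lv, hcl, Wf.lo, Wf.lc, by omega, Wf.hvo, ?_, ?_, ?_⟩
    · -- path_vis cleaned back to all-false
      intro k hk
      rw [hcg k hk]
      by_cases hm : (k : Int) ∈ path'
      · simp [hm]
      · rw [if_neg hm]
        have := Wf.hpv k hk
        cases hpk : pv'.getD k false
        · rfl
        · exact absurd ((Wf.hpv k hk).mp hpk) hm
    · -- all timestamps bounded by the new stamp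
      intro k hk
      by_cases hm : (k : Int) ∈ path'
      · obtain ⟨j, hj, hje⟩ := List.mem_iff_getElem.mp hm
        have := Wf.hop j hj
        rw [hje] at this
        have h2 : order'.getD ((k : Int)).toNat 0 = stamp + 1 + j := this
        simp only [Int.toNat_natCast] at h2
        rw [h2]
        omega
      · have := Wf.hoff k hk hm
        omega
    · -- the running maxima stay equal
      by_cases hcyc : curr' ≠ -1 ∧ PySem.List.pyGetD pv' curr' false = true
      · rw [if_pos hcyc, if_pos (hiff.mp hcyc), hsum hcyc, O.hmx]
      · rw [if_neg hcyc, if_neg (fun h => hcyc (hiff.mpr h))]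
        exact O.hmx
  · -- node i already visited: both skip
    have hA2 : vis.getD i.toNat false ≠ false := by
      intro h
      apply hA
      rw [PySem.List.pyGetD_of_nonneg _ _ hi.1,
        getD_irrel _ _ _ false (by rw [O.lv]; omega)]
      exact h
    have hB : ¬ PySem.List.pyGetD order i 1 = 0 := by
      rw [PySem.List.pyGetD_of_nonneg _ _ hi.1,
        getD_irrel _ _ _ 0 (by rw [O.lo]; omega)]
      intro h
      exact hA2 ((O.hvo i.toNat hiN).mpr h)
    simp only [aBody, bBody, if_neg hA, if_neg hB]
    exact O

-- the two outer folds stay in lockstep over any index list inside [0, NN)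
lemma foldSim (Edge : List Int) (NN : Nat)
    (hE : ∀ k : Nat, k < NN → -1 ≤ Edge.getD k (-1) ∧ Edge.getD k (-1) < (NN : Int))
    (fuel : Nat) (hf : fuel ≠ 0) :
    ∀ (L : List Int), (∀ i ∈ L, 0 ≤ i ∧ i < (NN : Int)) →
    ∀ (st1 : List Bool × List Bool × Int) (st2 : List Int × List Int × Int × Int),
    OInv NN st1.1 st1.2.1 st1.2.2 st2.1 st2.2.1 st2.2.2.1 st2.2.2.2 →
    OInv NN (L.foldl (aBody Edge fuel) st1).1 (L.foldl (aBody Edge fuel) st1).2.1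
      (L.foldl (aBody Edge fuel) st1).2.2 (L.foldl (bBody Edge fuel) st2).1
      (L.foldl (bBody Edge fuel) st2).2.1 (L.foldl (bBody Edge fuel) st2).2.2.1
      (L.foldl (bBody Edge fuel) st2).2.2.2 := by
  intro L
  induction L with
  | nil => intro _ st1 st2 O; exact O
  | cons x xs ih =>
    intro hmem st1 st2 O
    simp only [List.foldl_cons]
    exact ih (fun i hi => hmem i (List.mem_cons_of_mem _ hi))
      (aBody Edge fuel st1 x) (bBody Edge fuel st2 x)
      (bodySim Edge NN hE fuel hf x (hmem x List.mem_cons_self)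
        st1.1 st1.2.1 st1.2.2 st2.1 st2.2.1 st2.2.2.1 st2.2.2.2 O)
-- ===== VERDICT (by name: the statement is the Claim_ definition above) =====
theorem largestSumCycle_spec : Claim_equal_largestSumCycle := by
  intro N Edge _ hPre
  obtain ⟨hlen, hedge⟩ := hPre
  unfold Spec_largestSumCycle largestSumCycle largestSumCycle_alt
  have hE : ∀ k : Nat, k < N.toNat →
      -1 ≤ Edge.getD k (-1) ∧ Edge.getD k (-1) < ((N.toNat : Nat) : Int) := by
    intro k hk
    have hNpos : 0 < N := by omega
    have hkl : k < Edge.length := by omega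
    have hkt : k < (Edge.take N.toNat).length := by simp; omega
    have hmem : Edge[k] ∈ Edge.take N.toNat := by
      have : (Edge.take N.toNat)[k] = Edge[k] := List.getElem_take
      rw [← this]
      exact List.getElem_mem hkt
    have := hedge Edge[k] hmem
    rw [List.getD_eq_getElem _ _ hkl]
    omega
  have hmem : ∀ i ∈ PySem.List.pyRange 0 N 1, 0 ≤ i ∧ i < ((N.toNat : Nat) : Int) := by
    intro i hi
    have := PySem.List.mem_pyRange_one.mp hi
    omega
  have O0 : OInv N.toNat (List.replicate N.toNat false) (List.replicate N.toNat false) (-1)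
      (List.replicate N.toNat 0) (List.replicate N.toNat 0) 0 (-1) := by
    refine ⟨by simp, by simp, by simp, by simp, le_refl _, ?_, ?_, ?_, rfl⟩
    · intro k hk; rw [List.getD_replicate _ hk, List.getD_replicate _ hk]; simp
    · intro k hk; rw [List.getD_replicate _ hk]
    · intro k hk; rw [List.getD_replicate _ hk]
  exact (foldSim Edge N.toNat hE (N.toNat + 1) (by omega) (PySem.List.pyRange 0 N 1) hmem
    (List.replicate N.toNat false, List.replicate N.toNat false, (-1 : Int))
    (List.replicate N.toNat 0, List.replicate N.toNat 0, (0 : Int), (-1 : Int)) O0).hmx
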